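-- pv_equiv track=rewrite | github.com/ZongyuWu97/LeetCode | Heap/Find_the_K-Sum_of_an_Array.py | kSum
-- ===== SOURCE A (Python) =====
-- from typing import List
--
-- import heapq
--
-- def kSum(nums: List[int], k: int) -> int:
--     maxSum = sum([x for x in nums if x > 0])
--     absNum = sorted(map(abs, nums))
--     ans = maxSum
--     n = len(nums)
--
--     count = k
--     h = [(-(maxSum - absNum[0]), 0)]
--     while count > 1:
--         nextSum, idx = heapq.heappop(h)
--         nextSum = -nextSum
--         if idx < n - 1:
--             heapq.heappush(h, (-(nextSum - absNum[idx + 1]), idx + 1))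
--             heapq.heappush(
--                 h, (-(nextSum + absNum[idx] - absNum[idx + 1]), idx + 1))
--         ans = nextSum
--         count -= 1
--     return ans
-- ===== SOURCE B (Python) =====
-- def kSum(nums, k):
--     maxSum = sum([x for x in nums if x > 0])
--     absNum = sorted(map(abs, nums))
--     # number of smallest subset sums to track (at least one: the empty subset)
--     need = k if k > 1 else 1
--     sums = [0]
--     for a in absNum:
--         shifted = [s + a for s in sums]
--         merged = []
--         i = j = 0
--         while len(merged) < need and i < len(sums) and j < len(shifted):
--             if sums[i] <= shifted[j]:
--                 merged.append(sums[i]); i += 1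
--             else:
--                 merged.append(shifted[j]); j += 1
--         while len(merged) < need and i < len(sums):
--             merged.append(sums[i]); i += 1
--         while len(merged) < need and j < len(shifted):
--             merged.append(shifted[j]); j += 1
--         sums = merged
--     return maxSum - sums[need - 1]
-- ===== Notes on version B (the rewrite author's own statement) =====
-- stated objective: alternative
-- what changed: Replaces A's lazy best-first heap exploration of subset sums with a one-pass merge DP that keeps only the k smallest subset sums of the sorted absolute values in a bounded sorted list.
import Mathlib
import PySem

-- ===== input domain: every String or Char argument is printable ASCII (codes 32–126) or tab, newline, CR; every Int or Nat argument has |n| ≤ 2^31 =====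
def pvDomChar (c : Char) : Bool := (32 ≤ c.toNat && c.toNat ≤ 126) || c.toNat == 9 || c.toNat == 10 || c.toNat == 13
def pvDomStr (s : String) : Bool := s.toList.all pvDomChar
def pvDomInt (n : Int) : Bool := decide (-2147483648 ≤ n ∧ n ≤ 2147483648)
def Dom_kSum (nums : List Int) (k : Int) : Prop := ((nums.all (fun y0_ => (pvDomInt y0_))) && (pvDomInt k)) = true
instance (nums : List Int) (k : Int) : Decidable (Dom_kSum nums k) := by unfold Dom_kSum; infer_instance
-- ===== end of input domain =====

-- Port A: LeetCode "Find the K-Sum of an Array" via lazy best-first heap exploration.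
-- Port B: same value by a one-pass merge DP keeping only the k smallest subset sums (alternative algorithm, not claimed faster).


-- ===== PORT A =====

-- absNum[i] (indices used by A are always in range inside Pre_)
def pvAIdx (xs : List Int) (i : Int) : Int := (PySem.List.pyGet? xs i).getD 0

-- lexicographic ≤ on the heap entries (Python tuple comparison)
def pvLexLe (p q : Int × Int) : Bool := decide (p.1 < q.1 ∨ (p.1 = q.1 ∧ p.2 ≤ q.2))

-- heapq modelled by its observable specification: heappush appends, heappop removes the
-- lexicographically smallest entry (first occurrence).  Exact for A: equal keys are identical
-- pairs, so the popped value and the remaining multiset are what CPython's heapq produces.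
def pvPopMin : List (Int × Int) → Option ((Int × Int) × List (Int × Int))
  | [] => none
  | x :: xs =>
    match pvPopMin xs with
    | none => some (x, [])
    | some (m, rest) => if pvLexLe x m then some (x, xs) else some (m, x :: rest)

-- the `while count > 1` loop of A; c = number of remaining iterations (count - 1)
def pvLoopA (A : List Int) (n : Int) : Nat → List (Int × Int) → Int → Int
  | 0, _, ans => ans
  | c + 1, h, ans =>
    match pvPopMin h with
    | none => ans   -- Python: heappop from the empty heap raises IndexError; excluded by Pre_
    | some ((negS, idx), h') =>
      let s := -negS
      let h'' := if idx < n - 1 then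
          h' ++ [(-(s - pvAIdx A (idx + 1)), idx + 1),
                 (-(s + pvAIdx A idx - pvAIdx A (idx + 1)), idx + 1)]
        else h'
      pvLoopA A n c h'' s

def kSum (nums : List Int) (k : Int) : Int :=
  let maxSum := (nums.filter (fun x => decide (0 < x))).sum
  let absNum := PySem.List.sorted (nums.map (fun x => |x|)) (fun x => x) false
  let n : Int := nums.length
  let h := [(-(maxSum - pvAIdx absNum 0), 0)]
  pvLoopA absNum n (k - 1).toNat h maxSum

-- ===== PORT B =====

-- the three `while` loops of B: merge two lists, keeping at most `need` elements
def pvMergeTake : Nat → List Int → List Int → List Int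
  | 0, _, _ => []
  | m + 1, [], ys => ys.take (m + 1)
  | m + 1, x :: xs, [] => (x :: xs).take (m + 1)
  | m + 1, x :: xs, y :: ys =>
    if x ≤ y then x :: pvMergeTake m xs (y :: ys) else y :: pvMergeTake m (x :: xs) ys

def kSum_alt (nums : List Int) (k : Int) : Int :=
  let maxSum := (nums.filter (fun x => decide (0 < x))).sum
  let absNum := PySem.List.sorted (nums.map (fun x => |x|)) (fun x => x) false
  let need : Nat := if 1 < k then k.toNat else 1
  let sums := absNum.foldl (fun sums a => pvMergeTake need sums (sums.map (· + a))) [0]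
  maxSum - (PySem.List.pyGet? sums ((need : Int) - 1)).getD 0

-- ===== PRECONDITION & SPEC =====

-- Exactly the inputs on which A returns: A reads absNum[0] (IndexError on []), and pops the
-- heap k-1 times out of the 2^n - 1 nodes it can ever contain (IndexError once k > 2^n).
def Pre_kSum (nums : List Int) (k : Int) : Prop := nums ≠ [] ∧ k ≤ 2 ^ nums.length
instance (nums : List Int) (k : Int) : Decidable (Pre_kSum nums k) := by unfold Pre_kSum; infer_instance

def pvWitness_kSum : List Int × Int := ([1, -2], 3)


def Spec_kSum (nums : List Int) (k : Int) (out : Int) : Prop := out = kSum_alt nums k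
instance (nums : List Int) (k : Int) (out : Int) : Decidable (Spec_kSum nums k out) := by unfold Spec_kSum; infer_instance

-- ===== CLAIM (what is proved, stated in full; the proofs are below) =====
def Claim_equal_kSum : Prop := ∀ (nums : List Int) (k : Int), Dom_kSum nums k → Pre_kSum nums k → Spec_kSum nums k (kSum nums k)

-- ===== LEMMAS AND PROOFS =====

-- ---- generic facts about sorting Int lists with the identity key ----

def pvSortI (xs : List Int) : List Int := PySem.List.sorted xs (fun x => x) false

lemma pvSortI_perm (xs : List Int) : (pvSortI xs).Perm xs := PySem.List.sorted_perm xs _ false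

lemma pvSortI_pairwise (xs : List Int) : (pvSortI xs).Pairwise (· ≤ ·) := by
  have := PySem.List.sorted_pairwise (xs := xs) (key := fun x => x)
  simpa [pvSortI] using this

lemma pvSortI_eq {xs ys : List Int} (hperm : ys.Perm xs) (hp : ys.Pairwise (· ≤ ·)) : pvSortI xs = ys :=
  PySem.List.sorted_id_eq_of_perm_of_pairwise xs ys hperm hp

lemma pvSortI_congr_perm {xs ys : List Int} (h : xs.Perm ys) : pvSortI xs = pvSortI ys :=
  pvSortI_eq ((pvSortI_perm ys).trans h.symm) (pvSortI_pairwise ys)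

lemma pvSortI_split (U V : List Int) (hU : U.Pairwise (· ≤ ·))
    (hUV : ∀ u ∈ U, ∀ v ∈ V, u ≤ v) : pvSortI (U ++ V) = U ++ pvSortI V := by
  refine pvSortI_eq ((pvSortI_perm V).append_left U) ?_
  rw [List.pairwise_append]
  refine ⟨hU, pvSortI_pairwise V, ?_⟩
  intro u hu v hv
  exact hUV u hu v ((pvSortI_perm V).mem_iff.mp hv)

lemma pvSortI_head_min {X : List Int} {x : Int} (hx : x ∈ X) (hmin : ∀ y ∈ X, x ≤ y) :
    (pvSortI X).getD 0 0 = x := by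
  have hmem : x ∈ pvSortI X := (pvSortI_perm X).mem_iff.mpr hx
  obtain ⟨h, t, he⟩ : ∃ h t, pvSortI X = h :: t := by
    cases hs : pvSortI X with
    | nil => rw [hs] at hmem; simp at hmem
    | cons a b => exact ⟨a, b, rfl⟩
  have hhX : h ∈ X := (pvSortI_perm X).mem_iff.mp (by rw [he]; exact List.mem_cons_self ..)
  have hxh : x ≤ h := hmin h hhX
  have hpw := pvSortI_pairwise X
  rw [he] at hpw hmem
  have hhx : h ≤ x := by
    rcases List.mem_cons.mp hmem with h1 | h1
    · omega
    · exact (List.pairwise_cons.mp hpw).1 x h1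
  rw [he]; simp; omega

lemma pvSortI_map_add (c : Int) (X : List Int) :
    pvSortI (X.map (fun s => c + s)) = (pvSortI X).map (fun s => c + s) := by
  refine pvSortI_eq ((pvSortI_perm X).map _) ?_
  exact (pvSortI_pairwise X).map _ (by intro a b h; omega)

lemma pvSortI_cons_zero (X : List Int) (h0 : ∀ y ∈ X, (0:Int) ≤ y) :
    pvSortI (0 :: X) = 0 :: pvSortI X := by
  have := pvSortI_split [0] X (by simp) (by intro u hu v hv; simp at hu; subst hu; exact h0 v hv)
  simpa using this

-- ---- the full merge, and pvMergeTake as its truncation ----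

def pvFM : List Int → List Int → List Int
  | [], ys => ys
  | x :: xs, [] => x :: xs
  | x :: xs, y :: ys => if x ≤ y then x :: pvFM xs (y :: ys) else y :: pvFM (x :: xs) ys

lemma pvFM_nil_right (xs : List Int) : pvFM xs [] = xs := by cases xs <;> simp [pvFM]

lemma pvFM_perm (xs ys : List Int) : (pvFM xs ys).Perm (xs ++ ys) := by
  fun_induction pvFM with
  | case1 ys => simp
  | case2 x xs => simp
  | case3 x xs y ys hle ih => simpa [pvFM, hle] using ih.cons x
  | case4 x xs y ys hle ih =>
    exact (ih.cons y).trans (by simpa using (List.perm_middle (a := y) (l₁ := x :: xs) (l₂ := ys)).symm)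

lemma pvFM_pairwise {xs ys : List Int} (hx : xs.Pairwise (· ≤ ·)) (hy : ys.Pairwise (· ≤ ·)) :
    (pvFM xs ys).Pairwise (· ≤ ·) := by
  fun_induction pvFM with
  | case1 ys => exact hy
  | case2 x xs => exact hx
  | case3 x xs y ys hle ih =>
    rw [List.pairwise_cons] at hx ⊢
    refine ⟨?_, ih hx.2 hy⟩
    intro b hb
    have := (pvFM_perm xs (y :: ys)).mem_iff.mp hb
    simp at this
    rcases this with h | h | h
    · exact hx.1 b h
    · omega
    · have := (List.pairwise_cons.mp hy).1 b h; omega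
  | case4 x xs y ys hle ih =>
    rw [List.pairwise_cons] at hy ⊢
    refine ⟨?_, ih hx hy.2⟩
    intro b hb
    have := (pvFM_perm (x :: xs) ys).mem_iff.mp hb
    simp at this
    rcases this with h | h | h
    · omega
    · have := (List.pairwise_cons.mp hx).1 b h; omega
    · exact hy.1 b h

lemma pvFM_eq_sortI {xs ys : List Int} (hx : xs.Pairwise (· ≤ ·)) (hy : ys.Pairwise (· ≤ ·)) :
    pvFM xs ys = pvSortI (xs ++ ys) :=
  (pvSortI_eq (pvFM_perm xs ys) (pvFM_pairwise hx hy)).symm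

lemma pvMergeTake_eq (m : Nat) (xs ys : List Int) :
    pvMergeTake m xs ys = (pvFM xs ys).take m := by
  fun_induction pvMergeTake with
  | case1 xs ys => simp
  | case2 m ys => simp [pvFM]
  | case3 m x xs => simp [pvFM]
  | case4 m x xs y ys hle ih => simp [pvFM, hle, ih]
  | case5 m x xs y ys hle ih => simp [pvFM, hle, ih]

lemma pvFM_take_take : ∀ (m mx my : Nat) (xs ys : List Int), m ≤ mx → m ≤ my →
    (pvFM (xs.take mx) (ys.take my)).take m = (pvFM xs ys).take m := by
  intro m
  induction m with
  | zero => simp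
  | succ m ih =>
    intro mx my xs ys hmx hmy
    match xs, ys with
    | [], ys => simp [pvFM]; rw [List.take_take]; congr 1; omega
    | x :: xs, [] =>
      simp only [List.take_nil, pvFM_nil_right]
      rw [List.take_take]; congr 1; omega
    | x :: xs, y :: ys =>
      obtain ⟨mx', rfl⟩ : ∃ mx', mx = mx' + 1 := ⟨mx - 1, by omega⟩
      obtain ⟨my', rfl⟩ : ∃ my', my = my' + 1 := ⟨my - 1, by omega⟩
      simp only [List.take_succ_cons]
      by_cases hle : x ≤ y
      · simp only [pvFM, if_pos hle, List.take_succ_cons]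
        have : y :: ys.take my' = (y :: ys).take (my' + 1) := by simp
        rw [this, ih mx' (my' + 1) xs (y :: ys) (by omega) (by omega)]
      · simp only [pvFM, if_neg hle, List.take_succ_cons]
        have : x :: xs.take mx' = (x :: xs).take (mx' + 1) := by simp
        rw [this, ih (mx' + 1) my' (x :: xs) ys (by omega) (by omega)]

-- ---- subset sums ----

def pvAllS : List Int → List Int
  | [] => [0]
  | x :: l => pvAllS l ++ (pvAllS l).map (· + x)

def pvNes : List Int → List Int
  | [] => []
  | x :: l => x :: ((pvNes l).map (fun s => x + s) ++ pvNes l)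

lemma pvAllS_length (l : List Int) : (pvAllS l).length = 2 ^ l.length := by
  induction l with
  | nil => simp [pvAllS]
  | cons x l ih => simp [pvAllS, ih]; ring

lemma pvAllS_perm (l : List Int) : (pvAllS l).Perm (0 :: pvNes l) := by
  induction l with
  | nil => simp [pvAllS, pvNes]
  | cons x l ih =>
    have h1 : (pvAllS (x :: l)).Perm ((0 :: pvNes l) ++ (0 :: pvNes l).map (· + x)) :=
      ih.append (ih.map (· + x))
    refine h1.trans ?_
    simp only [List.map_cons, List.cons_append, pvNes]
    have h2 : ((pvNes l) ++ (0 + x) :: (pvNes l).map (· + x)).Perm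
        ((0 + x) :: ((pvNes l).map (· + x) ++ pvNes l)) := by
      simpa using List.perm_append_comm (l₁ := pvNes l) (l₂ := (0 + x) :: (pvNes l).map (· + x))
    refine (h2.cons 0).trans ?_
    have hm : (pvNes l).map (· + x) = (pvNes l).map (fun s => x + s) :=
      List.map_congr_left (fun a _ => by ring)
    simp [hm]

lemma pvNes_nonneg {l : List Int} (h : ∀ x ∈ l, (0:Int) ≤ x) : ∀ s ∈ pvNes l, (0:Int) ≤ s := by
  induction l with
  | nil => simp [pvNes]
  | cons x l ih =>
    intro s hs
    simp only [pvNes, List.mem_cons, List.mem_append, List.mem_map] at hs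
    have hx : (0:Int) ≤ x := h x (by simp)
    have hl : ∀ x ∈ l, (0:Int) ≤ x := fun y hy => h y (by simp [hy])
    rcases hs with rfl | ⟨t, ht, rfl⟩ | hs
    · exact hx
    · have := ih hl t ht; omega
    · exact ih hl s hs

lemma pvNes_length (l : List Int) : (pvNes l).length = 2 ^ l.length - 1 := by
  induction l with
  | nil => simp [pvNes]
  | cons x l ih =>
    have : (1:Nat) ≤ 2 ^ l.length := Nat.one_le_two_pow
    simp [pvNes, ih]; omega

lemma pvPermSwap3 {α : Type} (P Q R : List α) : (P ++ (Q ++ R)).Perm (Q ++ (P ++ R)) := by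
  have h1 : P ++ (Q ++ R) = (P ++ Q) ++ R := (List.append_assoc P Q R).symm
  have h2 : Q ++ (P ++ R) = (Q ++ P) ++ R := (List.append_assoc Q P R).symm
  rw [h1, h2]
  exact (List.perm_append_comm).append_right R

lemma pvAllS_append_singleton (l : List Int) (a : Int) :
    (pvAllS (l ++ [a])).Perm (pvAllS l ++ (pvAllS l).map (· + a)) := by
  induction l with
  | nil => simp [pvAllS]
  | cons x l ih =>
    show (pvAllS (l ++ [a]) ++ (pvAllS (l ++ [a])).map (· + x)).Perm _
    refine (ih.append (ih.map (· + x))).trans ?_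
    simp only [List.map_append, List.map_map, pvAllS, List.append_assoc]
    refine (List.Perm.append_left (pvAllS l) ?_)
    have hcomp : (pvAllS l).map ((· + x) ∘ (· + a)) = (pvAllS l).map ((· + a) ∘ (· + x)) :=
      List.map_congr_left (fun b _ => by simp; ring)
    rw [hcomp]
    exact pvPermSwap3 _ _ _

-- ---- B's fold ----

def pvExt (Y : List Int) : List Int → List Int
  | [] => Y
  | a :: l => pvExt (Y ++ Y.map (· + a)) l

lemma pvExt_append (Y : List Int) (l : List Int) (a : Int) :
    pvExt Y (l ++ [a]) = pvExt Y l ++ (pvExt Y l).map (· + a) := by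
  induction l generalizing Y with
  | nil => rfl
  | cons x l ih => exact ih (Y ++ Y.map (· + x))

lemma pvExt_perm_allS (l : List Int) : (pvExt [0] l).Perm (pvAllS l) := by
  induction l using List.reverseRecOn with
  | nil => simp [pvExt, pvAllS]
  | append_singleton l a ih =>
    rw [pvExt_append]
    exact (ih.append (ih.map (· + a))).trans (pvAllS_append_singleton l a).symm

lemma pvFold_inv (need : Nat) : ∀ (l Y : List Int),
    l.foldl (fun sums a => pvMergeTake need sums (sums.map (· + a))) ((pvSortI Y).take need)
      = (pvSortI (pvExt Y l)).take need := by
  intro l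
  induction l with
  | nil => intro Y; rfl
  | cons a l ih =>
    intro Y
    have hstep : pvMergeTake need ((pvSortI Y).take need) (((pvSortI Y).take need).map (· + a))
        = (pvSortI (Y ++ Y.map (· + a))).take need := by
      rw [pvMergeTake_eq, List.map_take,
        pvFM_take_take need need need _ _ le_rfl le_rfl,
        pvFM_eq_sortI (pvSortI_pairwise Y)
          ((pvSortI_pairwise Y).map _ (by intro a1 a2 h; omega)),
        pvSortI_congr_perm ((pvSortI_perm Y).append ((pvSortI_perm Y).map _))]
    show List.foldl _ (pvMergeTake need ((pvSortI Y).take need) _) l = _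
    rw [hstep, ih (Y ++ Y.map (· + a))]
    rfl

-- ---- A's tree of heap entries ----

def pvTree (A : List Int) (n : Int) (v i : Int) : List (Int × Int) :=
  (v, i) :: (if _h : i < n - 1 then
      pvTree A n (v + pvAIdx A (i + 1)) (i + 1)
        ++ pvTree A n (v + pvAIdx A (i + 1) - pvAIdx A i) (i + 1)
    else [])
termination_by (n - 1 - i).toNat
decreasing_by all_goals omega

lemma pvLexLe_trans {p q r : Int × Int} (h1 : pvLexLe p q = true) (h2 : pvLexLe q r = true) :
    pvLexLe p r = true := by
  simp only [pvLexLe, decide_eq_true_eq] at *; omega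

lemma pvLexLe_total (p q : Int × Int) : pvLexLe p q = true ∨ pvLexLe q p = true := by
  simp only [pvLexLe, decide_eq_true_eq]; omega

lemma pvLexLe_refl (p : Int × Int) : pvLexLe p p = true := by
  simp [pvLexLe]

lemma pvLexLe_fst {p q : Int × Int} (h : pvLexLe p q = true) : p.1 ≤ q.1 := by
  simp only [pvLexLe, decide_eq_true_eq] at h; omega

lemma pvAIdx_eq (A : List Int) (i : Int) (h0 : 0 ≤ i) (h1 : i < (A.length : Int)) :
    pvAIdx A i = A[i.toNat]'(by omega) := by
  rw [pvAIdx, PySem.List.pyGet?_of_nonneg _ h0,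
    List.getElem?_eq_getElem (show i.toNat < A.length by omega)]
  rfl

lemma pvAIdx_mem (A : List Int) (i : Int) (h0 : 0 ≤ i) (h1 : i < (A.length : Int)) :
    pvAIdx A i ∈ A := by
  rw [pvAIdx_eq A i h0 h1]; exact List.getElem_mem _

lemma pvTree_map_fst_aux (A : List Int) : ∀ (d : Nat) (v i : Int), 0 ≤ i →
    i ≤ (A.length : Int) - 1 → d = ((A.length : Int) - 1 - i).toNat →
    (pvTree A (A.length : Int) v i).map (·.1)
      = (pvNes (A.drop i.toNat)).map (fun s => (v - pvAIdx A i) + s) := by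
  intro d
  induction d with
  | zero =>
    intro v i h0 h1 hd
    have hi : i = (A.length : Int) - 1 := by omega
    rw [pvTree]
    rw [dif_neg (by omega)]
    have hlt : i.toNat < A.length := by omega
    rw [List.drop_eq_getElem_cons hlt]
    have : A.drop (i.toNat + 1) = [] := List.drop_eq_nil_of_le (by omega)
    rw [this]
    simp [pvNes, pvAIdx_eq A i h0 (by omega)]
  | succ d ih =>
    intro v i h0 h1 hd
    rw [pvTree]
    by_cases hlt : i < (A.length : Int) - 1
    · rw [dif_pos hlt]
      have ha1 : (i + 1).toNat = i.toNat + 1 := by omega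
      have e1 := ih (v + pvAIdx A (i + 1)) (i + 1) (by omega) (by omega) (by omega)
      have e2 := ih (v + pvAIdx A (i + 1) - pvAIdx A i) (i + 1) (by omega) (by omega) (by omega)
      have hitn : i.toNat < A.length := by omega
      rw [List.drop_eq_getElem_cons hitn]
      simp only [List.map_cons, List.map_append, e1, e2, pvNes, ha1, List.map_map]
      rw [pvAIdx_eq A i h0 (by omega)]
      refine (List.cons_eq_cons).mpr ⟨by ring, ?_⟩
      congr 1
      · exact List.map_congr_left (fun b _ => by simp; ring)
      · exact List.map_congr_left (fun b _ => by ring)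
    · -- cannot happen: d + 1 = (n - 1 - i).toNat > 0 forces i < n - 1
      omega

lemma pvTree_order_aux (A : List Int) (hA : A.Pairwise (· ≤ ·)) (hnn : ∀ x ∈ A, (0:Int) ≤ x) :
    ∀ (d : Nat) (v i : Int), 0 ≤ i → i ≤ (A.length : Int) - 1 →
    d = ((A.length : Int) - 1 - i).toNat →
    ∀ r ∈ pvTree A (A.length : Int) v i,
      pvLexLe (v, i) r = true ∧ 0 ≤ r.2 ∧ r.2 ≤ (A.length : Int) - 1 := by
  intro d
  induction d with
  | zero =>
    intro v i h0 h1 hd r hr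
    rw [pvTree, dif_neg (by omega)] at hr
    simp at hr
    subst hr
    exact ⟨pvLexLe_refl _, by simpa using h0, by simpa using h1⟩
  | succ d ih =>
    intro v i h0 h1 hd r hr
    rw [pvTree] at hr
    by_cases hlt : i < (A.length : Int) - 1
    · rw [dif_pos hlt] at hr
      have hnn1 : (0:Int) ≤ pvAIdx A (i + 1) :=
        hnn _ (pvAIdx_mem A (i + 1) (by omega) (by omega))
      have hmono : pvAIdx A i ≤ pvAIdx A (i + 1) := by
        rw [pvAIdx_eq A i h0 (by omega), pvAIdx_eq A (i + 1) (by omega) (by omega)]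
        exact List.pairwise_iff_getElem.mp hA i.toNat (i + 1).toNat (by omega) (by omega) (by omega)
      rcases List.mem_cons.mp hr with rfl | hr'
      · exact ⟨pvLexLe_refl _, h0, h1⟩
      · rcases List.mem_append.mp hr' with hr1 | hr2
        · have := ih (v + pvAIdx A (i + 1)) (i + 1) (by omega) (by omega) (by omega) r hr1
          refine ⟨pvLexLe_trans ?_ this.1, this.2⟩
          simp only [pvLexLe, decide_eq_true_eq]; omega
        · have := ih (v + pvAIdx A (i + 1) - pvAIdx A i) (i + 1) (by omega) (by omega) (by omega) r hr2
          refine ⟨pvLexLe_trans ?_ this.1, this.2⟩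
          simp only [pvLexLe, decide_eq_true_eq]; omega
    · omega

lemma pvTree_map_fst (A : List Int) (v i : Int) (h0 : 0 ≤ i) (h1 : i ≤ (A.length : Int) - 1) :
    (pvTree A (A.length : Int) v i).map (·.1)
      = (pvNes (A.drop i.toNat)).map (fun s => (v - pvAIdx A i) + s) :=
  pvTree_map_fst_aux A _ v i h0 h1 rfl

lemma pvTree_order (A : List Int) (hA : A.Pairwise (· ≤ ·)) (hnn : ∀ x ∈ A, (0:Int) ≤ x)
    (v i : Int) (h0 : 0 ≤ i) (h1 : i ≤ (A.length : Int) - 1) :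
    ∀ r ∈ pvTree A (A.length : Int) v i,
      pvLexLe (v, i) r = true ∧ 0 ≤ r.2 ∧ r.2 ≤ (A.length : Int) - 1 :=
  pvTree_order_aux A hA hnn _ v i h0 h1 rfl

-- ---- popMin spec ----

lemma pvPopMin_none_iff (h : List (Int × Int)) : pvPopMin h = none ↔ h = [] := by
  cases h with
  | nil => simp [pvPopMin]
  | cons x xs =>
    simp only [pvPopMin]
    cases hx : pvPopMin xs with
    | none => simp
    | some p => obtain ⟨m, rest⟩ := p; by_cases hle : pvLexLe x m <;> simp [hle]

lemma pvPopMin_perm : ∀ {h rest : List (Int × Int)} {m : Int × Int},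
    pvPopMin h = some (m, rest) → (m :: rest).Perm h := by
  intro h
  induction h with
  | nil => intro rest m hp; simp [pvPopMin] at hp
  | cons x xs ih =>
    intro rest m hp
    simp only [pvPopMin] at hp
    cases hx : pvPopMin xs with
    | none =>
      rw [hx] at hp
      simp only [Option.some.injEq, Prod.mk.injEq] at hp
      obtain ⟨rfl, rfl⟩ := hp
      have : xs = [] := (pvPopMin_none_iff xs).mp hx
      subst this; rfl
    | some p =>
      obtain ⟨m', rest'⟩ := p
      rw [hx] at hp
      by_cases hle : pvLexLe x m'
      · simp only [hle, if_pos, Option.some.injEq, Prod.mk.injEq] at hp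
        obtain ⟨rfl, rfl⟩ := hp; rfl
      · simp only [hle, Bool.false_eq_true] at hp
        obtain ⟨rfl, rfl⟩ := hp
        exact (List.Perm.swap x m rest').trans ((ih hx).cons x)

lemma pvPopMin_min : ∀ {h rest : List (Int × Int)} {m : Int × Int},
    pvPopMin h = some (m, rest) → ∀ y ∈ h, pvLexLe m y = true := by
  intro h
  induction h with
  | nil => intro rest m hp; simp [pvPopMin] at hp
  | cons x xs ih =>
    intro rest m hp y hy
    simp only [pvPopMin] at hp
    cases hx : pvPopMin xs with
    | none =>
      rw [hx] at hp
      simp only [Option.some.injEq, Prod.mk.injEq] at hp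
      obtain ⟨rfl, rfl⟩ := hp
      have hnil : xs = [] := (pvPopMin_none_iff xs).mp hx
      subst hnil
      simp at hy; subst hy; exact pvLexLe_refl _
    | some p =>
      obtain ⟨m', rest'⟩ := p
      rw [hx] at hp
      by_cases hle : pvLexLe x m'
      · simp only [hle, if_pos, Option.some.injEq, Prod.mk.injEq] at hp
        obtain ⟨rfl, rfl⟩ := hp
        rcases List.mem_cons.mp hy with rfl | hy'
        · exact pvLexLe_refl _
        · exact pvLexLe_trans hle (ih hx y hy')
      · simp only [hle, Bool.false_eq_true] at hp
        obtain ⟨rfl, rfl⟩ := hp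
        rcases List.mem_cons.mp hy with rfl | hy'
        · rcases pvLexLe_total m y with h1 | h1
          · exact h1
          · exact absurd h1 (by simpa using hle)
        · exact ih hx y hy'

lemma pvLoopA_main (A : List Int) (hA : A.Pairwise (· ≤ ·)) (hnn : ∀ x ∈ A, (0:Int) ≤ x) :
    ∀ (c : Nat) (h P : List (Int × Int)) (ans : Int), 1 ≤ c →
    (∀ p ∈ P, ∀ q ∈ h, pvLexLe p q = true) →
    P.Pairwise (fun p q => pvLexLe p q = true) →
    (∀ q ∈ h, 0 ≤ q.2 ∧ q.2 ≤ (A.length : Int) - 1) →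
    c ≤ (h.flatMap (fun q => pvTree A (A.length : Int) q.1 q.2)).length →
    pvLoopA A (A.length : Int) c h ans
      = -((pvSortI (((P ++ h.flatMap (fun q => pvTree A (A.length : Int) q.1 q.2)).map (·.1)))).getD
            (P.length + c - 1) 0) := by
  intro c
  induction c with
  | zero => intro h P ans hc; omega
  | succ c ih =>
    intro h P ans _ hPh hPp hq hlen
    set n : Int := (A.length : Int) with hn
    set treeF : Int × Int → List (Int × Int) := fun q => pvTree A n q.1 q.2 with htreeF
    -- the heap is nonempty, so the pop succeeds
    cases hpop : pvPopMin h with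
    | none =>
      have : h = [] := (pvPopMin_none_iff h).mp hpop
      subst this; simp at hlen
    | some pr =>
      obtain ⟨⟨negS, idx⟩, h'⟩ := pr
      have hperm : ((negS, idx) :: h').Perm h := pvPopMin_perm hpop
      have hmin : ∀ y ∈ h, pvLexLe (negS, idx) y = true := pvPopMin_min hpop
      have hm_mem : (negS, idx) ∈ h := hperm.subset (List.mem_cons_self ..)
      have hmb := hq _ hm_mem
      have hsub' : ∀ q ∈ h', q ∈ h := fun q hq' => hperm.subset (List.mem_cons_of_mem _ hq')
      have hordm := pvTree_order A hA hnn negS idx (by exact hmb.1) (by exact hmb.2)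
      -- the two pushed children, written as the tree's child roots
      have e1 : -(-negS - pvAIdx A (idx + 1)) = negS + pvAIdx A (idx + 1) := by ring
      have e2 : -(-negS + pvAIdx A idx - pvAIdx A (idx + 1))
          = negS + pvAIdx A (idx + 1) - pvAIdx A idx := by ring
      set c1 : Int × Int := (negS + pvAIdx A (idx + 1), idx + 1) with hc1
      set c2 : Int × Int := (negS + pvAIdx A (idx + 1) - pvAIdx A idx, idx + 1) with hc2
      set h'' : List (Int × Int) := if idx < n - 1 then h' ++ [c1, c2] else h' with hh''
      have hstep : pvLoopA A n (c + 1) h ans = pvLoopA A n c h'' (-negS) := by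
        simp only [pvLoopA, hpop, e1, e2, hh'', hc1, hc2]
      -- expansion of the popped node: its tree is itself plus the pushed children's trees
      have hexp : (h.flatMap treeF).Perm ((negS, idx) :: h''.flatMap treeF) := by
        refine (List.Perm.flatMap_right treeF hperm.symm).trans ?_
        by_cases hcase : idx < n - 1
        · rw [hh'', if_pos hcase]
          show (treeF (negS, idx) ++ h'.flatMap treeF).Perm _
          have : treeF (negS, idx) = (negS, idx) :: (pvTree A n c1.1 c1.2 ++ pvTree A n c2.1 c2.2) := by
            rw [htreeF]
            show pvTree A n negS idx = _
            rw [pvTree, dif_pos hcase]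
          rw [this]
          refine List.Perm.cons _ ?_
          have : (h' ++ [c1, c2]).flatMap treeF
              = h'.flatMap treeF ++ (pvTree A n c1.1 c1.2 ++ pvTree A n c2.1 c2.2) := by
            simp [List.flatMap_append, htreeF]
          rw [this]
          exact List.perm_append_comm
        · rw [hh'', if_neg hcase]
          show (treeF (negS, idx) ++ h'.flatMap treeF).Perm _
          have : treeF (negS, idx) = [(negS, idx)] := by
            rw [htreeF]
            show pvTree A n negS idx = _
            rw [pvTree, dif_neg hcase]
          rw [this]; rfl
      have hchild : ∀ q ∈ h'', pvLexLe (negS, idx) q = true := by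
        intro q hq'
        by_cases hcase : idx < n - 1
        · rw [hh'', if_pos hcase] at hq'
          rcases List.mem_append.mp hq' with hq1 | hq2
          · exact hmin q (hsub' q hq1)
          · have hmemtree : q ∈ pvTree A n negS idx := by
              rw [pvTree, dif_pos hcase]
              rcases List.mem_cons.mp hq2 with rfl | hq3
              · refine List.mem_cons_of_mem _ (List.mem_append.mpr (Or.inl ?_))
                rw [pvTree]; exact List.mem_cons_self ..
              · simp at hq3
                subst hq3
                refine List.mem_cons_of_mem _ (List.mem_append.mpr (Or.inr ?_))
                rw [pvTree]; exact List.mem_cons_self ..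
            exact (hordm q hmemtree).1
        · rw [hh'', if_neg hcase] at hq'
          exact hmin q (hsub' q hq')
      have hq'' : ∀ q ∈ h'', 0 ≤ q.2 ∧ q.2 ≤ n - 1 := by
        intro q hq'
        by_cases hcase : idx < n - 1
        · rw [hh'', if_pos hcase] at hq'
          rcases List.mem_append.mp hq' with hq1 | hq2
          · exact hq q (hsub' q hq1)
          · rcases List.mem_cons.mp hq2 with rfl | hq3
            · refine ⟨?_, ?_⟩ <;> simp [hc1] <;> omega
            · simp at hq3; subst hq3
              refine ⟨?_, ?_⟩ <;> simp [hc2] <;> omega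
        · rw [hh'', if_neg hcase] at hq'
          exact hq q (hsub' q hq')
      have hPh'' : ∀ p ∈ P ++ [(negS, idx)], ∀ q ∈ h'', pvLexLe p q = true := by
        intro p hp q hq'
        rcases List.mem_append.mp hp with hp1 | hp2
        · exact pvLexLe_trans (hPh p hp1 _ hm_mem) (hchild q hq')
        · simp at hp2; subst hp2; exact hchild q hq'
      have hPp'' : (P ++ [(negS, idx)]).Pairwise (fun p q => pvLexLe p q = true) := by
        rw [List.pairwise_append]
        exact ⟨hPp, by simp, by intro p hp q hq'; simp at hq'; subst hq'; exact hPh p hp _ hm_mem⟩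
      have hMS : ((P ++ [(negS, idx)]) ++ h''.flatMap treeF).Perm (P ++ h.flatMap treeF) := by
        rw [List.append_assoc]
        exact List.Perm.append_left P (by simpa using hexp.symm)
      have hlen'' : c ≤ (h''.flatMap treeF).length := by
        have hl := hexp.length_eq
        rw [List.length_cons] at hl
        omega
      by_cases hc0 : c = 0
      · -- last iteration: the loop returns the popped sum
        subst hc0
        rw [hstep]
        show -negS = _
        -- split the sorted list at the popped elements
        have hsplit : pvSortI ((P ++ h.flatMap treeF).map (·.1))
            = P.map (·.1) ++ pvSortI ((h.flatMap treeF).map (·.1)) := by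
          rw [List.map_append]
          refine pvSortI_split _ _ (hPp.map _ (fun {p q} hpq => pvLexLe_fst hpq)) ?_
          intro u hu v hv
          obtain ⟨p, hp, rfl⟩ := List.mem_map.mp hu
          obtain ⟨r, hr, rfl⟩ := List.mem_map.mp hv
          obtain ⟨q, hqh, hrq⟩ := List.mem_flatMap.mp hr
          have h1 : pvLexLe p q = true := hPh p hp q hqh
          have h2 : pvLexLe q r = true :=
            (pvTree_order A hA hnn q.1 q.2 (hq q hqh).1 (hq q hqh).2 r
              (by simpa [htreeF] using hrq)).1
          exact pvLexLe_fst (pvLexLe_trans h1 h2)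
        rw [hsplit]
        have hgd : (P.map (·.1) ++ pvSortI ((h.flatMap treeF).map (·.1))).getD (P.length + 1 - 1) 0
            = (pvSortI ((h.flatMap treeF).map (·.1))).getD 0 0 := by
          have : P.length + 1 - 1 = (P.map (·.1)).length := by simp
          rw [this]
          simp [List.getD_eq_getElem?_getD, List.getElem?_append_right]
        rw [hgd]
        have hhead : (pvSortI ((h.flatMap treeF).map (·.1))).getD 0 0 = negS := by
          refine pvSortI_head_min ?_ ?_
          · refine List.mem_map.mpr ⟨(negS, idx), ?_, rfl⟩
            refine List.mem_flatMap.mpr ⟨(negS, idx), hm_mem, ?_⟩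
            show (negS, idx) ∈ pvTree A n negS idx
            rw [pvTree]; exact List.mem_cons_self ..
          · intro y hy
            obtain ⟨r, hr, rfl⟩ := List.mem_map.mp hy
            obtain ⟨q, hqh, hrq⟩ := List.mem_flatMap.mp hr
            have h2 : pvLexLe q r = true :=
              (pvTree_order A hA hnn q.1 q.2 (hq q hqh).1 (hq q hqh).2 r
                (by simpa [htreeF] using hrq)).1
            exact pvLexLe_fst (pvLexLe_trans (hmin q hqh) h2)
        rw [hhead]
      · -- more iterations remain: apply the induction hypothesis to the new heap
        rw [hstep, ih h'' (P ++ [(negS, idx)]) (-negS) (by omega) hPh'' hPp'' hq'' hlen'']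
        rw [pvSortI_congr_perm (hMS.map (·.1))]
        have hidx : (P ++ [(negS, idx)]).length + c - 1 = P.length + (c + 1) - 1 := by
          simp only [List.length_append, List.length_cons, List.length_nil]
          omega
        rw [hidx]

lemma pvGetD_map (f : Int → Int) (l : List Int) (j : Nat) (hj : j < l.length) :
    (l.map f).getD j 0 = f (l.getD j 0) := by
  rw [List.getD_eq_getElem?_getD, List.getD_eq_getElem?_getD, List.getElem?_map,
    List.getElem?_eq_getElem hj]
  rfl

-- the shared final-value form of both programs
lemma pvMain (nums : List Int) (k : Int) (hne : nums ≠ []) (hk : k ≤ 2 ^ nums.length) :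
    kSum nums k = kSum_alt nums k := by
  simp only [kSum, kSum_alt]
  set maxSum := (nums.filter (fun x => decide (0 < x))).sum with hms
  set absNum := PySem.List.sorted (nums.map (fun x => |x|)) (fun x => x) false with habsN
  have hA : absNum.Pairwise (· ≤ ·) := by
    have := PySem.List.sorted_pairwise (xs := nums.map (fun x => |x|)) (key := fun x => x)
    simpa [habsN] using this
  have hnn : ∀ x ∈ absNum, (0:Int) ≤ x := by
    intro x hx
    rw [habsN, PySem.List.mem_sorted] at hx
    obtain ⟨y, _, rfl⟩ := List.mem_map.mp hx
    exact abs_nonneg y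
  have hlenA : absNum.length = nums.length := by
    rw [habsN, PySem.List.length_sorted, List.length_map]
  have hn1 : 1 ≤ nums.length := by
    cases nums with
    | nil => exact absurd rfl hne
    | cons a l => simp
  set need : Nat := if 1 < k then k.toNat else 1 with hneed
  have hneed1 : 1 ≤ need := by rw [hneed]; split <;> omega
  have hpow : ((2 ^ nums.length : Nat) : Int) = 2 ^ nums.length := by push_cast; rfl
  have hneedle : need ≤ 2 ^ nums.length := by
    rw [hneed]; split
    · omega
    · exact Nat.one_le_two_pow
  -- B's accumulator is the sorted k smallest subset sums
  have hsums : absNum.foldl (fun sums a => pvMergeTake need sums (sums.map (· + a))) [0]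
      = (pvSortI (pvAllS absNum)).take need := by
    have hinit : ([0] : List Int) = (pvSortI [0]).take need := by
      have h1 : pvSortI [0] = [0] := pvSortI_eq (List.Perm.refl _) (by simp)
      rw [h1, List.take_of_length_le (by simp [hneed1])]
    rw [hinit, pvFold_inv need absNum [0],
      pvSortI_congr_perm (pvExt_perm_allS absNum)]
  have hlenS : (pvSortI (pvAllS absNum)).length = 2 ^ nums.length := by
    rw [(pvSortI_perm (pvAllS absNum)).length_eq, pvAllS_length, hlenA]
  -- the k-th smallest subset sum, via the sorted list with the empty sum in front
  have hzero : pvSortI (pvAllS absNum) = 0 :: pvSortI (pvNes absNum) := by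
    rw [pvSortI_congr_perm (pvAllS_perm absNum)]
    exact pvSortI_cons_zero _ (pvNes_nonneg hnn)
  -- B's value
  have hB : maxSum - (PySem.List.pyGet?
        (absNum.foldl (fun sums a => pvMergeTake need sums (sums.map (· + a))) [0])
        ((need : Int) - 1)).getD 0
      = maxSum - (pvSortI (pvAllS absNum)).getD (need - 1) 0 := by
    rw [hsums]
    have hcast : (need : Int) - 1 = ((need - 1 : Nat) : Int) := by omega
    rw [hcast, PySem.List.pyGet?_natCast]
    have hget : ((pvSortI (pvAllS absNum)).take need)[(need - 1 : Nat)]?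
        = (pvSortI (pvAllS absNum))[(need - 1 : Nat)]? := by
      rw [List.getElem?_take]
      simp [show need - 1 < need by omega]
    rw [List.getD_eq_getElem?_getD, hget]
  rw [hB]
  by_cases hk1 : 1 < k
  · -- at least one pop: the loop invariant gives the (k-1)-th largest explored sum
    have hc1 : 1 ≤ (k - 1).toNat := by omega
    have hcast : (nums.length : Int) = (absNum.length : Int) := by rw [hlenA]
    rw [hcast]
    set v0 : Int := -(maxSum - pvAIdx absNum 0) with hv0
    have htlen : (pvTree absNum (absNum.length : Int) v0 0).length
        = 2 ^ nums.length - 1 := by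
      have := congrArg List.length (pvTree_map_fst absNum v0 0 (by omega) (by omega))
      simp only [List.length_map] at this
      rw [this, pvNes_length]
      simp [hlenA]
    rw [pvLoopA_main absNum hA hnn (k - 1).toNat [(v0, 0)] [] maxSum hc1
      (by intro p hp; simp at hp)
      (by simp)
      (by intro q hq; simp at hq; subst hq; exact ⟨by simp, by simp; omega⟩)
      (by simpa [htlen] using (show (k - 1).toNat ≤ 2 ^ nums.length - 1 by omega))]
    simp only [List.nil_append, List.flatMap_cons, List.flatMap_nil, List.append_nil,
      List.length_nil, Nat.zero_add]
    rw [pvTree_map_fst absNum v0 0 (by omega) (by omega)]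
    have he : v0 - pvAIdx absNum 0 = -maxSum := by rw [hv0]; ring
    rw [he]
    simp only [Int.toNat_zero, List.drop_zero]
    rw [pvSortI_map_add (-maxSum)]
    have hidxlt : (k - 1).toNat - 1 < (pvSortI (pvNes absNum)).length := by
      rw [(pvSortI_perm _).length_eq, pvNes_length, hlenA]
      have h2 : (2:Nat) ≤ 2 ^ nums.length := by
        calc (2:Nat) = 2 ^ 1 := rfl
          _ ≤ 2 ^ nums.length := Nat.pow_le_pow_right (by omega) hn1
      omega
    rw [pvGetD_map _ _ _ hidxlt, hzero]
    have hneedk : need - 1 = ((k - 1).toNat - 1) + 1 := by rw [hneed, if_pos hk1]; omega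
    rw [hneedk, List.getD_cons_succ]
    ring
  · -- k ≤ 1: no pop happens and both sides are maxSum
    have hzeroit : (k - 1).toNat = 0 := by omega
    rw [hzeroit]
    show maxSum = _
    have hneede : need = 1 := by rw [hneed, if_neg hk1]
    rw [hneede, hzero]
    simp

-- ===== VERDICT (by name: the statement is the Claim_ definition above) =====
theorem kSum_spec : Claim_equal_kSum := by
  intro nums k _ hpre
  exact pvMain nums k hpre.1 hpre.2
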